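-- pv_equiv track=rewrite | github.com/Goofycat874/Easy-Language | compiler.py | process_text_in_args
-- ===== SOURCE A (Python) =====
-- def process_text_in_args(args_str: str) -> str:
--     """Converts DSL text arguments into a quoted string."""
--     tokens = args_str.split()
--     result = []
--     i = 0
--     while i < len(tokens):
--         if tokens[i] == "text" and i + 1 < len(tokens):
--             result.append(f'"{tokens[i+1]}"')
--             i += 2
--         else:
--             result.append(tokens[i])
--             i += 1
--     return " ".join(result)
-- ===== SOURCE B (Python) =====
-- def process_text_in_args(args_str: str) -> str:
--     """Converts DSL text arguments into a quoted string."""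
--     out = []
--     pending = False
--     for tok in args_str.split():
--         if pending:
--             out.append(f'"{tok}"')
--             pending = False
--         elif tok == "text":
--             pending = True
--         else:
--             out.append(tok)
--     if pending:
--         out.append("text")
--     return " ".join(out)
-- ===== Notes on version B (the rewrite author's own statement) =====
-- stated objective: alternative
-- what changed: Replaced the index-based while loop with a lookahead at position i+1 by a single forward for-loop state machine carrying one boolean flag; no indexing or lookahead remains.
import Mathlib
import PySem

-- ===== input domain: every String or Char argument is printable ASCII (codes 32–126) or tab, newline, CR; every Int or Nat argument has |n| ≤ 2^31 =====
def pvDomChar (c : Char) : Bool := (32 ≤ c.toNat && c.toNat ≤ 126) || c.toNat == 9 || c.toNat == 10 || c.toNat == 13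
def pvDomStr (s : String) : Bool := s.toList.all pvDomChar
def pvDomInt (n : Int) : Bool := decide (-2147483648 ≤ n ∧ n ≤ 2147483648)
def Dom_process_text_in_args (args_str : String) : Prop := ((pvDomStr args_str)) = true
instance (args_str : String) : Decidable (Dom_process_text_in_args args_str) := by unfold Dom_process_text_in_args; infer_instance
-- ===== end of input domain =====

-- B replaces A's index-advancing while loop (with tokens[i+1] lookahead) by a one-pass
-- state machine over the tokens carrying a boolean "pending" flag; alternative, same cost.


-- ===== PORT A =====
-- A's while loop: i steps by 2 on a "text"-with-argument match, else by 1; result list built in order.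
def pvALoop (tokens : List (List Char)) (i : Nat) : List (List Char) :=
  if _h : i < tokens.length then
    if tokens.getD i [] == ['t','e','x','t'] && decide (i + 1 < tokens.length) then
      ('"' :: tokens.getD (i+1) [] ++ ['"']) :: pvALoop tokens (i+2)
    else
      tokens.getD i [] :: pvALoop tokens (i+1)
  else []
termination_by tokens.length - i

def process_text_in_args (args_str : String) : String :=
  String.ofList (PySem.Chars.join [' '] (pvALoop (PySem.Chars.split₀ args_str.toList) 0))

-- ===== PORT B =====
-- B's for loop: one forward pass, a Bool "pending" is the whole state; trailing pending emits "text".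
def pvBLoop : List (List Char) → Bool → List (List Char)
  | [], pending => if pending then [['t','e','x','t']] else []
  | t :: ts, pending =>
    if pending then ('"' :: t ++ ['"']) :: pvBLoop ts false
    else if t == ['t','e','x','t'] then pvBLoop ts true
    else t :: pvBLoop ts false

def process_text_in_args_alt (args_str : String) : String :=
  String.ofList (PySem.Chars.join [' '] (pvBLoop (PySem.Chars.split₀ args_str.toList) false))

-- ===== PRECONDITION & SPEC =====
def Spec_process_text_in_args (args_str : String) (out : String) : Prop := out = process_text_in_args_alt args_str
instance (args_str : String) (out : String) : Decidable (Spec_process_text_in_args args_str out) := by unfold Spec_process_text_in_args; infer_instance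

-- ===== CLAIM (what is proved, stated in full; the proofs are below) =====
def Claim_equal_process_text_in_args : Prop := ∀ (args_str : String), Dom_process_text_in_args args_str → Spec_process_text_in_args args_str (process_text_in_args args_str)

-- ===== LEMMAS AND PROOFS =====

-- A's loop from index i computes exactly B's pass over the remaining suffix with pending = false.
theorem pvLoop_eq (tokens : List (List Char)) :
    ∀ n i, tokens.length - i ≤ n → pvALoop tokens i = pvBLoop (tokens.drop i) false := by
  intro n
  induction n with
  | zero =>
    intro i hle
    have hge : tokens.length ≤ i := by omega
    rw [pvALoop, dif_neg (by omega), List.drop_eq_nil_of_le hge, pvBLoop, if_neg (by simp)]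
  | succ n ih =>
    intro i hle
    by_cases h : i < tokens.length
    · have hdrop : tokens.drop i = tokens[i] :: tokens.drop (i+1) :=
        List.drop_eq_getElem_cons h
      have hgd : tokens.getD i [] = tokens[i] := by
        simp [List.getD_eq_getElem?_getD, List.getElem?_eq_getElem h]
      rw [pvALoop, dif_pos h, hdrop]
      by_cases htxt : tokens[i] = ['t','e','x','t']
      · by_cases h2 : i + 1 < tokens.length
        · have hdrop2 : tokens.drop (i+1) = tokens[i+1] :: tokens.drop (i+2) :=
            List.drop_eq_getElem_cons h2
          have hgd2 : tokens.getD (i+1) [] = tokens[i+1] := by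
            simp [List.getD_eq_getElem?_getD, List.getElem?_eq_getElem h2]
          rw [if_pos (by simp [List.getElem?_eq_getElem h, htxt, h2]), pvBLoop, if_neg (by simp),
              if_pos (by simp [htxt]), hdrop2, pvBLoop, if_pos rfl, hgd2]
          exact congrArg _ (ih (i+2) (by omega))
        · have hdrop2 : tokens.drop (i+1) = [] :=
            List.drop_eq_nil_of_le (by omega)
          rw [if_neg (by simp [List.getElem?_eq_getElem h, htxt]; omega), pvBLoop, if_neg (by simp),
              if_pos (by simp [htxt]), hdrop2, pvBLoop, if_pos rfl, hgd, htxt]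
          rw [pvALoop, dif_neg (by omega)]
      · rw [if_neg (by simp [List.getElem?_eq_getElem h, htxt]), pvBLoop, if_neg (by simp),
            if_neg (by simp [htxt]), hgd]
        exact congrArg _ (ih (i+1) (by omega))
    · rw [pvALoop, dif_neg h, List.drop_eq_nil_of_le (by omega), pvBLoop, if_neg (by simp)]

-- ===== VERDICT (by name: the statement is the Claim_ definition above) =====
theorem process_text_in_args_spec : Claim_equal_process_text_in_args := by
  intro args_str _
  unfold Spec_process_text_in_args process_text_in_args process_text_in_args_alt
  rw [pvLoop_eq (PySem.Chars.split₀ args_str.toList) _ 0 (le_refl _), List.drop_zero]
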